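-- pv_equiv track=rewrite | github.com/nerochristian/modbot | cogs/tickets.py | _unique_channel_name
-- ===== SOURCE A (Python) =====
-- def _unique_channel_name(base: str, existing_names: set[str]) -> str:
--     base = (base or "").strip().lower()
--     if base and base not in existing_names:
--         return base
--
--     alphabet = "abcdefghijklmnopqrstuvwxyz"
--     suffix = 0
--     while True:
--         suffix += 1
--         x = suffix
--         letters = []
--         while x > 0:
--             x -= 1
--             letters.append(alphabet[x % 26])
--             x //= 26
--         candidate = f"{base}-" + "".join(reversed(letters))
--         if candidate not in existing_names:
--             return candidate
-- ===== SOURCE B (Python) =====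
-- def _unique_channel_name(base: str, existing_names: set[str]) -> str:
--     base = (base or "").strip().lower()
--     if base and base not in existing_names:
--         return base
--
--     letters = []  # suffix letters as an odometer, least-significant letter first
--     while True:
--         # advance the odometer: carry 'z' -> 'a', append a fresh 'a' on overflow
--         i = 0
--         while i < len(letters) and letters[i] == 'z':
--             letters[i] = 'a'
--             i += 1
--         if i == len(letters):
--             letters.append('a')
--         else:
--             letters[i] = chr(ord(letters[i]) + 1)
--         candidate = f"{base}-" + "".join(reversed(letters))
--         if candidate not in existing_names:
--             return candidate
-- ===== Notes on version B (the rewrite author's own statement) =====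
-- stated objective: alternative
-- what changed: The integer suffix counter and its per-candidate divmod reconversion to letters are replaced by a character odometer that is advanced in place with carries ('z'->'a', prepending 'a' on overflow), so no integer state or base-26 decomposition exists in B.
import Mathlib
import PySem

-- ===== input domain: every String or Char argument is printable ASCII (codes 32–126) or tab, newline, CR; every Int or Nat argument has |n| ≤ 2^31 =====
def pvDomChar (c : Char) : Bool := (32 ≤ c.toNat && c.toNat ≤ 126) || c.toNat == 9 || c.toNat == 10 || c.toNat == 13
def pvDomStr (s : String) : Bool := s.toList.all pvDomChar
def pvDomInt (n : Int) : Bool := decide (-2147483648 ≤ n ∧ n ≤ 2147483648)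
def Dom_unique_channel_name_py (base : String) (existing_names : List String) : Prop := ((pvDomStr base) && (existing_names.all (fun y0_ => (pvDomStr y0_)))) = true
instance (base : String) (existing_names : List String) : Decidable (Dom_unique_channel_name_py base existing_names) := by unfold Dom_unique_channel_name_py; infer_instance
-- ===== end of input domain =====

-- B replaces A's integer suffix counter + divmod-to-letters reconversion by a character odometer
-- advanced with carries; same results, alternative mechanism (no measured speed claim).
-- Both search loops are fuel-bounded by existing_names.length + 1: the candidates are pairwise
-- distinct, so the first free one is always found within that many steps (the "" fuel-out value
-- is unreachable on real runs; it only makes the recursions total).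

-- ===== PORT A =====
def pvAlphabet : String := "abcdefghijklmnopqrstuvwxyz"

-- inner while: x -= 1; letters.append(alphabet[x % 26]); x //= 26
def pvLettersA (x : Int) (acc : List Char) : List Char :=
  if _h : 0 < x then
    pvLettersA (PySem.Int.floordiv (x - 1) 26)
      (acc ++ [(PySem.Str.pyGet? pvAlphabet (PySem.Int.mod (x - 1) 26)).getD 'a'])
  else acc
termination_by x.toNat
decreasing_by
  have hd : PySem.Int.floordiv (x - 1) 26 = (x - 1) / 26 :=
    PySem.Int.floordiv_eq_ediv_of_pos (by norm_num)
  rw [hd]; omega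

def pvSearchA (b : String) (ex : List String) : Nat → Int → String
  | 0, _ => ""
  | fuel + 1, suffix =>
    let s := suffix + 1
    let cand := String.ofList (b.toList ++ '-' :: (pvLettersA s []).reverse)
    if ex.contains cand then pvSearchA b ex fuel s else cand

def unique_channel_name_py (base : String) (existing_names : List String) : String :=
  let b := PySem.Str.lower (PySem.Str.strip base)
  if b ≠ "" ∧ ¬ existing_names.contains b then b
  else pvSearchA b existing_names (existing_names.length + 1) 0

-- ===== PORT B =====
-- the odometer advance: carry 'z' -> 'a' rightward (least-significant first), overflow appends 'a'
def pvAdvance : List Char → List Char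
  | [] => ['a']
  | c :: cs => if c = 'z' then 'a' :: pvAdvance cs else Char.ofNat (c.toNat + 1) :: cs

def pvSearchB (b : String) (ex : List String) : Nat → List Char → String
  | 0, _ => ""
  | fuel + 1, letters =>
    let L := pvAdvance letters
    let cand := String.ofList (b.toList ++ '-' :: L.reverse)
    if ex.contains cand then pvSearchB b ex fuel L else cand

def unique_channel_name_py_alt (base : String) (existing_names : List String) : String :=
  let b := PySem.Str.lower (PySem.Str.strip base)
  if b ≠ "" ∧ ¬ existing_names.contains b then b
  else pvSearchB b existing_names (existing_names.length + 1) []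

-- ===== PRECONDITION & SPEC =====
def Spec_unique_channel_name_py (base : String) (existing_names : List String) (out : String) : Prop := out = unique_channel_name_py_alt base existing_names
instance (base : String) (existing_names : List String) (out : String) : Decidable (Spec_unique_channel_name_py base existing_names out) := by unfold Spec_unique_channel_name_py; infer_instance

-- ===== CLAIM (what is proved, stated in full; the proofs are below) =====
def Claim_equal_unique_channel_name_py : Prop := ∀ (base : String) (existing_names : List String), Dom_unique_channel_name_py base existing_names → Spec_unique_channel_name_py base existing_names (unique_channel_name_py base existing_names)

-- ===== LEMMAS AND PROOFS =====

-- little-endian bijective base-26 digits of k (model of A's inner loop for suffix = k)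
def pvAlphaC (m : Nat) : Char := (PySem.Str.pyGet? pvAlphabet (m : Int)).getD 'a'

def pvDigits : Nat → List Char
  | 0 => []
  | k + 1 => pvAlphaC (k % 26) :: pvDigits (k / 26)
decreasing_by omega

lemma pvDigits_zero : pvDigits 0 = [] := by rw [pvDigits]

lemma pvDigits_succ (k : Nat) : pvDigits (k + 1) = pvAlphaC (k % 26) :: pvDigits (k / 26) := by
  rw [pvDigits]

lemma pvAlphaC_zero : pvAlphaC 0 = 'a' := by decide

lemma pvLettersA_eq (k : Nat) : ∀ acc, pvLettersA (k : Int) acc = acc ++ pvDigits k := by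
  induction k using Nat.strong_induction_on with
  | _ k ih =>
    intro acc
    match k with
    | 0 => rw [pvLettersA]; simp [pvDigits_zero]
    | m + 1 =>
      rw [pvLettersA]
      have hx : ((m + 1 : Nat) : Int) - 1 = (m : Int) := by push_cast; ring
      have hd : PySem.Int.floordiv ((m : Int)) 26 = ((m / 26 : Nat) : Int) := by
        exact_mod_cast PySem.Int.floordiv_natCast m 26
      have hm : PySem.Int.mod ((m : Int)) 26 = ((m % 26 : Nat) : Int) := by
        exact_mod_cast PySem.Int.mod_natCast m 26
      simp only [hx, hd, hm]
      rw [dif_pos (by exact_mod_cast Nat.succ_pos m)]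
      rw [ih (m / 26) (by omega)]
      rw [pvDigits_succ]
      simp [pvAlphaC]

lemma pvAlphaC_25 : pvAlphaC 25 = 'z' := by decide

lemma pvAlphaC_ne_z {r : Nat} (h : r < 25) : pvAlphaC r ≠ 'z' := by
  interval_cases r <;> decide

lemma pvAlphaC_succ {r : Nat} (h : r < 25) :
    Char.ofNat ((pvAlphaC r).toNat + 1) = pvAlphaC (r + 1) := by
  interval_cases r <;> decide

lemma pvAdvance_digits (k : Nat) : pvAdvance (pvDigits k) = pvDigits (k + 1) := by
  induction k using Nat.strong_induction_on with
  | _ k ih =>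
    match k with
    | 0 =>
      show pvAdvance (pvDigits 0) = pvDigits (0 + 1)
      rw [pvDigits_zero, pvDigits_succ]
      norm_num
      rw [pvDigits_zero, pvAlphaC_zero]
      rfl
    | m + 1 =>
      rw [pvDigits_succ m]
      by_cases h : m % 26 = 25
      · rw [pvAdvance, h, if_pos pvAlphaC_25]
        rw [ih (m / 26) (by omega)]
        rw [pvDigits_succ (m + 1)]
        have h1 : (m + 1) % 26 = 0 := by omega
        have h2 : (m + 1) / 26 = m / 26 + 1 := by omega
        rw [h1, h2, pvAlphaC_zero]
      · have hr : m % 26 < 25 := by omega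
        rw [pvAdvance, if_neg (pvAlphaC_ne_z hr), pvAlphaC_succ hr]
        rw [pvDigits_succ (m + 1)]
        have h1 : (m + 1) % 26 = m % 26 + 1 := by omega
        have h2 : (m + 1) / 26 = m / 26 := by omega
        rw [h1, h2]

lemma pvSearch_eq (b : String) (ex : List String) :
    ∀ (fuel k : Nat), pvSearchA b ex fuel (k : Int) = pvSearchB b ex fuel (pvDigits k) := by
  intro fuel
  induction fuel with
  | zero => intro k; rfl
  | succ n ih =>
    intro k
    show pvSearchA b ex (n + 1) (k : Int) = pvSearchB b ex (n + 1) (pvDigits k)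
    rw [pvSearchA, pvSearchB]
    have hs : (k : Int) + 1 = ((k + 1 : Nat) : Int) := by push_cast; ring
    simp only [hs, pvLettersA_eq, List.nil_append, pvAdvance_digits]
    split
    · exact ih (k + 1)
    · rfl

-- ===== VERDICT (by name: the statement is the Claim_ definition above) =====
theorem unique_channel_name_py_spec : Claim_equal_unique_channel_name_py := by
  intro base existing_names _
  unfold Spec_unique_channel_name_py unique_channel_name_py unique_channel_name_py_alt
  show (if (PySem.Str.lower (PySem.Str.strip base)) ≠ "" ∧
            ¬ existing_names.contains (PySem.Str.lower (PySem.Str.strip base)) = true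
        then (PySem.Str.lower (PySem.Str.strip base))
        else pvSearchA (PySem.Str.lower (PySem.Str.strip base)) existing_names
              (existing_names.length + 1) 0)
      = (if (PySem.Str.lower (PySem.Str.strip base)) ≠ "" ∧
            ¬ existing_names.contains (PySem.Str.lower (PySem.Str.strip base)) = true
        then (PySem.Str.lower (PySem.Str.strip base))
        else pvSearchB (PySem.Str.lower (PySem.Str.strip base)) existing_names
              (existing_names.length + 1) [])
  split
  · rfl
  · have h := pvSearch_eq (PySem.Str.lower (PySem.Str.strip base)) existing_names
      (existing_names.length + 1) 0
    rw [pvDigits_zero] at h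
    exact_mod_cast h
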